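-- pv_equiv track=rewrite | github.com/cameronsaddress/AI_Trader | scripts/strategy_validation.py | contiguous_partitions
-- ===== SOURCE A (Python) =====
-- from typing import Dict, List, Optional, Sequence, Tuple
--
-- def contiguous_partitions(length: int, parts: int) -> List[Tuple[int, int]]:
--     base = length // parts
--     extra = length % parts
--     ranges: List[Tuple[int, int]] = []
--     start = 0
--     for i in range(parts):
--         width = base + (1 if i < extra else 0)
--         end = start + width
--         ranges.append((start, end))
--         start = end
--     return ranges
-- ===== SOURCE B (Python) =====
-- from typing import Dict, List, Optional, Sequence, Tuple
--
-- def contiguous_partitions(length: int, parts: int) -> List[Tuple[int, int]]: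
--     base, extra = divmod(length, parts)
--     return [(i * base + min(i, extra), (i + 1) * base + min(i + 1, extra))
--             for i in range(parts)]
-- ===== Notes on version B (the rewrite author's own statement) =====
-- stated objective: alternative
-- what changed: Replaces the loop-carried running start with closed-form boundaries start_i = i*base + min(i, extra) computed independently per index.
import Mathlib
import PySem

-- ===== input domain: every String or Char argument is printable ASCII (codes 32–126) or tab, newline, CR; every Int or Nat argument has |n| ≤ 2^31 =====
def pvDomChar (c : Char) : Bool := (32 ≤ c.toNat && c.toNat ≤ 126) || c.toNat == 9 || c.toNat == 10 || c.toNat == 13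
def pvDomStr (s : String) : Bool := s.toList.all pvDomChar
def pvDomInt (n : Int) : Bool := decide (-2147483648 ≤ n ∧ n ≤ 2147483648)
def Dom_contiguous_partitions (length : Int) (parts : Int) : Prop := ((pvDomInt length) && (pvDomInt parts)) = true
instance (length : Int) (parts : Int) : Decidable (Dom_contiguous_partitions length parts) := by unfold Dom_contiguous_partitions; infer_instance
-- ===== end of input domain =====

-- B computes each partition boundary in closed form (start_i = i*base + min(i, extra)) instead of
-- carrying a running start between loop iterations; same cost, different decomposition.


-- ===== PORT A =====
def contiguous_partitions (length : Int) (parts : Int) : List (Int × Int) :=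
  let base := PySem.Int.floordiv length parts
  let extra := PySem.Int.mod length parts
  let st := (PySem.List.pyRange 0 parts 1).foldl
    (fun (s : List (Int × Int) × Int) i =>
      let width := base + (if i < extra then 1 else 0)
      let e := s.2 + width
      (s.1 ++ [(s.2, e)], e)) ([], 0)
  st.1

-- ===== PORT B =====
def contiguous_partitions_alt (length : Int) (parts : Int) : List (Int × Int) :=
  let base := PySem.Int.floordiv length parts
  let extra := PySem.Int.mod length parts
  (PySem.List.pyRange 0 parts 1).map
    (fun i => (i * base + min i extra, (i + 1) * base + min (i + 1) extra))

-- ===== PRECONDITION & SPEC =====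
-- Pre_ excludes exactly parts = 0, where Python A raises ZeroDivisionError.
def Pre_contiguous_partitions (length : Int) (parts : Int) : Prop := parts ≠ 0
instance (length : Int) (parts : Int) : Decidable (Pre_contiguous_partitions length parts) := by unfold Pre_contiguous_partitions; infer_instance
def pvWitness_contiguous_partitions : Int × Int := (10, 3)
def Spec_contiguous_partitions (length : Int) (parts : Int) (out : List (Int × Int)) : Prop := out = contiguous_partitions_alt length parts
instance (length : Int) (parts : Int) (out : List (Int × Int)) : Decidable (Spec_contiguous_partitions length parts out) := by unfold Spec_contiguous_partitions; infer_instance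

-- ===== CLAIM (what is proved, stated in full; the proofs are below) =====
def Claim_equal_contiguous_partitions : Prop := ∀ (length : Int) (parts : Int), Dom_contiguous_partitions length parts → Pre_contiguous_partitions length parts → Spec_contiguous_partitions length parts (contiguous_partitions length parts)

-- ===== LEMMAS AND PROOFS =====

-- Loop invariant: A's fold starting at position a with running start a*base + min a extra
-- appends exactly B's closed-form ranges for indices a..b.
theorem pv_loop (base extra b : Int) : ∀ (n : Nat) (a : Int) (acc : List (Int × Int)),
    (b - a).toNat = n →
    ((PySem.List.pyRange a b 1).foldl
      (fun (s : List (Int × Int) × Int) i =>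
        let width := base + (if i < extra then 1 else 0)
        let e := s.2 + width
        (s.1 ++ [(s.2, e)], e)) (acc, a * base + min a extra)).1
    = acc ++ (PySem.List.pyRange a b 1).map
        (fun i => (i * base + min i extra, (i + 1) * base + min (i + 1) extra)) := by
  intro n
  induction n with
  | zero =>
    intro a acc h
    rw [PySem.List.pyRange_one_eq_nil (by omega)]
    simp
  | succ n ih =>
    intro a acc h
    rw [PySem.List.pyRange_one_cons (by omega)]
    simp only [List.foldl_cons, List.map_cons]
    have hstep : a * base + min a extra + (base + (if a < extra then 1 else 0))
        = (a + 1) * base + min (a + 1) extra := by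
      by_cases hlt : a < extra <;> simp [hlt] <;> ring_nf <;> omega
    have := ih (a + 1) (acc ++ [(a * base + min a extra, (a + 1) * base + min (a + 1) extra)]) (by omega)
    simp only [hstep]
    rw [this]
    simp

-- The fold from start 0: specialisation of pv_loop at a = 0 (needs 0 ≤ extra).
theorem pv_loop0 (base extra b : Int) (hextra : 0 ≤ extra) :
    ((PySem.List.pyRange 0 b 1).foldl
      (fun (s : List (Int × Int) × Int) i =>
        let width := base + (if i < extra then 1 else 0)
        let e := s.2 + width
        (s.1 ++ [(s.2, e)], e)) ([], 0)).1
    = (PySem.List.pyRange 0 b 1).map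
        (fun i => (i * base + min i extra, (i + 1) * base + min (i + 1) extra)) := by
  have h0 : ((([] : List (Int × Int)), (0 : Int))) = (([] : List (Int × Int)), 0 * base + min 0 extra) := by
    simp [min_eq_left hextra]
  rw [h0]
  exact pv_loop base extra b b.toNat 0 [] (by omega)

-- ===== VERDICT (by name: the statement is the Claim_ definition above) =====
theorem contiguous_partitions_spec : Claim_equal_contiguous_partitions := by
  intro length parts _ hp
  unfold Spec_contiguous_partitions contiguous_partitions contiguous_partitions_alt
  by_cases hpos : 0 < parts
  · exact pv_loop0 _ _ parts (PySem.Int.mod_nonneg length hpos)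
  · rw [PySem.List.pyRange_one_eq_nil (by omega)]
    simp
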